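-- pv_equiv track=rewrite | github.com/genfeel/ci-pl-web-analyzer | shipping_doc_automation/src/parser/ci_parser.py | _find_ci_sheet
-- ===== SOURCE A (Python) =====
-- from typing import Optional
--
-- def _find_ci_sheet(sheet_names: list) -> Optional[str]:
--     """CI 시트명 자동 탐지"""
--     for name in sheet_names:
--         upper = name.upper().strip()
--         if upper == 'CI':
--             return name
--         if 'CI' in upper and 'PL' not in upper:
--             return name
--     for name in sheet_names:
--         if 'CI' in name.upper():
--             return name
--     return sheet_names[0] if sheet_names else None
-- ===== SOURCE B (Python) =====
-- from typing import Optional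
--
-- def _find_ci_sheet(sheet_names: list) -> Optional[str]:
--     """Single pass remembering the first priority and first fallback candidates."""
--     priority = None   # first name containing 'CI' but not 'PL' (case-insensitive)
--     fallback = None   # first name containing 'CI' at all
--     for name in sheet_names:
--         u = name.upper()
--         if 'CI' in u:
--             if fallback is None:
--                 fallback = name
--             if priority is None and 'PL' not in u:
--                 priority = name
--     if priority is not None:
--         return priority
--     if fallback is not None:
--         return fallback
--     return sheet_names[0] if sheet_names else None
-- ===== Notes on version B (the rewrite author's own statement) =====
-- stated objective: alternative
-- what changed: Replaced A's two sequential scans (priority pass, then fallback pass) by one pass that remembers the first priority and first fallback candidates in two set-once variables, dropping the redundant exact-'CI' check and .strip().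
import Mathlib
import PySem

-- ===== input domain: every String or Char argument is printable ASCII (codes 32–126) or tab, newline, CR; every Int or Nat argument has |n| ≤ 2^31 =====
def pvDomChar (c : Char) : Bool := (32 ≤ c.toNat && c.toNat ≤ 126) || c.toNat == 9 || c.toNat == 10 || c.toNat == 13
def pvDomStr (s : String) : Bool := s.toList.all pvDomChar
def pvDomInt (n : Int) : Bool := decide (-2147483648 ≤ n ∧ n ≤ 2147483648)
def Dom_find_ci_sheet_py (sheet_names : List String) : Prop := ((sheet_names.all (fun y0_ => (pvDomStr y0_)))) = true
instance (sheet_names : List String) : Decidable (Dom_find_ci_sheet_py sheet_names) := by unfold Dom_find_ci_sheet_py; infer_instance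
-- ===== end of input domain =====

-- B does one pass with two set-once candidate variables instead of A's two sequential scans; same result, total on all inputs.

-- ===== PORT A =====
def find_ci_sheet_py_loop1 : List String → Option String
  | [] => none
  | name :: rest =>
    let u := PySem.Str.strip (PySem.Str.upper name)
    if u == "CI" then some name
    else if PySem.Str.isIn "CI" u && !PySem.Str.isIn "PL" u then some name
    else find_ci_sheet_py_loop1 rest

def find_ci_sheet_py_loop2 : List String → Option String
  | [] => none
  | name :: rest =>
    if PySem.Str.isIn "CI" (PySem.Str.upper name) then some name
    else find_ci_sheet_py_loop2 rest

def find_ci_sheet_py (sheet_names : List String) : Option String :=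
  match find_ci_sheet_py_loop1 sheet_names with
  | some n => some n
  | none =>
    match find_ci_sheet_py_loop2 sheet_names with
    | some n => some n
    | none =>
      match sheet_names with
      | [] => none
      | x :: _ => some x

-- ===== PORT B =====
def find_ci_sheet_py_altStep (st : Option String × Option String) (name : String) :
    Option String × Option String :=
  let u := PySem.Str.upper name
  if PySem.Str.isIn "CI" u then
    let fallback := if st.2.isNone then some name else st.2
    let priority := if st.1.isNone && !PySem.Str.isIn "PL" u then some name else st.1
    (priority, fallback)
  else st

def find_ci_sheet_py_alt (sheet_names : List String) : Option String :=
  let st := sheet_names.foldl find_ci_sheet_py_altStep (none, none)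
  match st.1 with
  | some n => some n
  | none =>
    match st.2 with
    | some n => some n
    | none => sheet_names.head?

-- ===== PRECONDITION & SPEC =====
def Spec_find_ci_sheet_py (sheet_names : List String) (out : Option String) : Prop := out = find_ci_sheet_py_alt sheet_names
instance (sheet_names : List String) (out : Option String) : Decidable (Spec_find_ci_sheet_py sheet_names out) := by unfold Spec_find_ci_sheet_py; infer_instance

-- ===== CLAIM (what is proved, stated in full; the proofs are below) =====
def Claim_equal_find_ci_sheet_py : Prop := ∀ (sheet_names : List String), Dom_find_ci_sheet_py sheet_names → Spec_find_ci_sheet_py sheet_names (find_ci_sheet_py sheet_names)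

-- ===== LEMMAS AND PROOFS =====

-- the two first-match predicates B maintains
def pvPredP (s : String) : Bool :=
  PySem.Str.isIn "CI" (PySem.Str.upper s) && !PySem.Str.isIn "PL" (PySem.Str.upper s)
def pvPredF (s : String) : Bool := PySem.Str.isIn "CI" (PySem.Str.upper s)

-- a two-char pattern whose first char is not whitespace occurs in dropWhile isspace u iff it occurs in u
lemma pvInfix_pair_dropWhile {c1 c2 : Char} (h1 : PySem.Chars.isspace c1 = false)
    (u : List Char) :
    [c1, c2] <:+: u.dropWhile PySem.Chars.isspace ↔ [c1, c2] <:+: u := by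
  induction u with
  | nil => simp
  | cons x u ih =>
    by_cases hx : PySem.Chars.isspace x
    · rw [List.dropWhile_cons_of_pos hx, ih]
      constructor
      · exact fun h => List.infix_cons h
      · intro h
        rcases (List.infix_cons_iff).1 h with hp | hi
        · rcases hp with ⟨t, ht⟩
          have hc : c1 = x := by
            have := congrArg (fun l => l.head?) ht
            simpa using this
          rw [hc, hx] at h1
          exact absurd h1 (by simp)
        · exact hi
    · rw [List.dropWhile_cons_of_neg hx]

-- …hence occurs in strip u iff it occurs in u
lemma pvInfix_pair_strip {c1 c2 : Char} (h1 : PySem.Chars.isspace c1 = false)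
    (h2 : PySem.Chars.isspace c2 = false) (u : List Char) :
    [c1, c2] <:+: PySem.Chars.strip u ↔ [c1, c2] <:+: u := by
  have hrev : ∀ (a b : Char) (l : List Char), ([a, b] <:+: l.reverse ↔ [b, a] <:+: l) := by
    intro a b l
    have h := List.reverse_infix (l₁ := [b, a]) (l₂ := l)
    simpa using h
  unfold PySem.Chars.strip PySem.Chars.rstrip PySem.Chars.lstrip
  rw [hrev c1 c2, pvInfix_pair_dropWhile h2, hrev c2 c1, pvInfix_pair_dropWhile h1]

lemma pvIsIn_pair_strip (c1 c2 : Char) (h1 : PySem.Chars.isspace c1 = false)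
    (h2 : PySem.Chars.isspace c2 = false) (u : List Char) :
    PySem.Chars.isIn [c1, c2] (PySem.Chars.strip u) = PySem.Chars.isIn [c1, c2] u := by
  by_cases h : [c1, c2] <:+: u
  · rw [(PySem.Chars.isIn_iff_infix _ _).2 h,
        (PySem.Chars.isIn_iff_infix _ _).2 ((pvInfix_pair_strip h1 h2 u).2 h)]
  · rw [(PySem.Chars.isIn_eq_false_iff _ _).2 h,
        (PySem.Chars.isIn_eq_false_iff _ _).2 (fun hc => h ((pvInfix_pair_strip h1 h2 u).1 hc))]

-- the .strip() in A's first-pass tests is invisible to the substring tests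
lemma pvStrip_CI (s : String) :
    PySem.Str.isIn "CI" (PySem.Str.strip s) = PySem.Str.isIn "CI" s := by
  rw [PySem.Str.isIn_eq, PySem.Str.isIn_eq, PySem.Str.toList_strip]
  exact pvIsIn_pair_strip 'C' 'I' (by decide) (by decide) _

lemma pvStrip_PL (s : String) :
    PySem.Str.isIn "PL" (PySem.Str.strip s) = PySem.Str.isIn "PL" s := by
  rw [PySem.Str.isIn_eq, PySem.Str.isIn_eq, PySem.Str.toList_strip]
  exact pvIsIn_pair_strip 'P' 'L' (by decide) (by decide) _

-- A's combined first-loop test on a name equals B's priority predicate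
lemma pvLoop1_pred (s : String) :
    ((PySem.Str.strip (PySem.Str.upper s) == "CI") ||
      (PySem.Str.isIn "CI" (PySem.Str.strip (PySem.Str.upper s)) &&
        !PySem.Str.isIn "PL" (PySem.Str.strip (PySem.Str.upper s)))) = pvPredP s := by
  unfold pvPredP
  rw [pvStrip_CI, pvStrip_PL]
  by_cases he : PySem.Str.strip (PySem.Str.upper s) = "CI"
  · have hci : PySem.Str.isIn "CI" (PySem.Str.upper s) = true := by
      rw [← pvStrip_CI, he]; decide
    have hpl : PySem.Str.isIn "PL" (PySem.Str.upper s) = false := by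
      rw [← pvStrip_PL, he]; decide
    have hbe : (PySem.Str.strip (PySem.Str.upper s) == "CI") = true := beq_iff_eq.mpr he
    rw [hbe, hci, hpl]
    rfl
  · have hbe : (PySem.Str.strip (PySem.Str.upper s) == "CI") = false := by
      rw [beq_eq_false_iff_ne]; exact he
    rw [hbe, Bool.false_or]

lemma pvLoop1_eq (l : List String) : find_ci_sheet_py_loop1 l = l.find? pvPredP := by
  induction l with
  | nil => rfl
  | cons n rest ih =>
    have h := pvLoop1_pred n
    simp only [find_ci_sheet_py_loop1]
    cases hp : pvPredP n with
    | true =>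
      rw [List.find?_cons_of_pos hp]
      rw [hp] at h
      rcases (Bool.or_eq_true _ _).mp (by rw [h]) with h1 | h2
      · rw [if_pos h1]
      · by_cases h1 : (PySem.Str.strip (PySem.Str.upper n) == "CI") = true
        · rw [if_pos h1]
        · rw [if_neg h1, if_pos h2]
    | false =>
      rw [hp] at h
      have h1 := Bool.or_eq_false_iff.1 h
      rw [if_neg (fun hc => by rw [h1.1] at hc; exact Bool.false_ne_true hc),
        if_neg (fun hc => by rw [h1.2] at hc; exact Bool.false_ne_true hc), ih,
        List.find?_cons_of_neg (fun hc => by rw [hp] at hc; exact Bool.false_ne_true hc)]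

lemma pvLoop2_eq (l : List String) : find_ci_sheet_py_loop2 l = l.find? pvPredF := by
  induction l with
  | nil => rfl
  | cons n rest ih =>
    simp only [find_ci_sheet_py_loop2]
    cases hp : pvPredF n with
    | true =>
      rw [List.find?_cons_of_pos hp,
        if_pos (show PySem.Str.isIn "CI" (PySem.Str.upper n) = true from hp)]
    | false =>
      have hx : PySem.Str.isIn "CI" (PySem.Str.upper n) = false := hp
      rw [List.find?_cons_of_neg (fun hc => by rw [hp] at hc; exact Bool.false_ne_true hc),
        if_neg (fun hc => by rw [hx] at hc; exact Bool.false_ne_true hc), ih]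

-- B's fold computes exactly the two first matches (set-once semantics)
lemma pvFold_spec (l : List String) (p f : Option String) :
    l.foldl find_ci_sheet_py_altStep (p, f) = (p.or (l.find? pvPredP), f.or (l.find? pvPredF)) := by
  induction l generalizing p f with
  | nil => simp
  | cons n rest ih =>
    rw [List.foldl_cons]
    cases hf : PySem.Str.isIn "CI" (PySem.Str.upper n) with
    | false =>
      have hp : ¬ pvPredP n = true := by
        unfold pvPredP; rw [hf]; simp
      have hf' : ¬ pvPredF n = true := by
        unfold pvPredF; rw [hf]; exact Bool.false_ne_true
      have hstep : find_ci_sheet_py_altStep (p, f) n = (p, f) := by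
        simp only [find_ci_sheet_py_altStep, hf]
        simp
      rw [hstep, ih, List.find?_cons_of_neg hp, List.find?_cons_of_neg hf']
    | true =>
      have hf' : pvPredF n = true := hf
      cases hpl : PySem.Str.isIn "PL" (PySem.Str.upper n) with
      | true =>
        have hp : ¬ pvPredP n = true := by
          unfold pvPredP; rw [hpl]; simp
        have hstep : find_ci_sheet_py_altStep (p, f) n
            = (p, if f.isNone then some n else f) := by
          simp only [find_ci_sheet_py_altStep, hf, hpl]
          simp
        rw [hstep, ih, List.find?_cons_of_neg hp, List.find?_cons_of_pos hf']
        cases p <;> cases f <;> simp [Option.or]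
      | false =>
        have hp : pvPredP n = true := by
          unfold pvPredP; rw [hf, hpl]; rfl
        have hstep : find_ci_sheet_py_altStep (p, f) n
            = (if p.isNone then some n else p, if f.isNone then some n else f) := by
          simp only [find_ci_sheet_py_altStep, hf, hpl]
          simp
        rw [hstep, ih, List.find?_cons_of_pos hp, List.find?_cons_of_pos hf']
        cases p <;> cases f <;> simp [Option.or]

-- ===== VERDICT (by name: the statement is the Claim_ definition above) =====
theorem find_ci_sheet_py_spec : Claim_equal_find_ci_sheet_py := by
  intro l _
  unfold Spec_find_ci_sheet_py find_ci_sheet_py find_ci_sheet_py_alt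
  rw [pvLoop1_eq, pvLoop2_eq, pvFold_spec]
  cases l.find? pvPredP <;> cases l.find? pvPredF <;> cases l <;> simp [Option.or]
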